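-- pv_equiv track=rewrite | github.com/litaibai1201/alarm_service | loggers/core/context.py | _is_logger_configured
-- ===== SOURCE A (Python) =====
-- def _is_logger_configured(logger_name: str, configured_loggers: set) -> bool:
--     """检查 logger_name 是否在预配置中（包括作为子 logger）
--
--     Args:
--         logger_name: 要检查的 logger 名称
--         configured_loggers: 已配置的 logger 名称集合
--
--     Returns:
--         bool: 如果 logger_name 或其父级在配置中则返回 True
--     """
--     # 精确匹配
--     if logger_name in configured_loggers:
--         return True
--
--     # 检查是否是已配置 logger 的子 logger
--     # 例如 "test.structured" 是 "test" 的子 logger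
--     parts = logger_name.split('.')
--     for i in range(len(parts) - 1, 0, -1):
--         parent_name = '.'.join(parts[:i])
--         if parent_name in configured_loggers:
--             return True
--
--     return False
-- ===== SOURCE B (Python) =====
-- def _is_logger_configured(logger_name: str, configured_loggers: set) -> bool:
--     """Scan the configured collection once: a configured name c covers
--     logger_name iff they are equal or c is a dotted ancestor prefix."""
--     for configured in configured_loggers:
--         if logger_name == configured or logger_name.startswith(configured + '.'):
--             return True
--     return False
-- ===== Notes on version B (the rewrite author's own statement) =====
-- stated objective: simpler
-- what changed: B scans the configured names once with an equality-or-dotted-prefix test (c == name or name.startswith(c + '.')) instead of generating every ancestor prefix of logger_name by split/join and hashing each.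
import Mathlib
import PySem

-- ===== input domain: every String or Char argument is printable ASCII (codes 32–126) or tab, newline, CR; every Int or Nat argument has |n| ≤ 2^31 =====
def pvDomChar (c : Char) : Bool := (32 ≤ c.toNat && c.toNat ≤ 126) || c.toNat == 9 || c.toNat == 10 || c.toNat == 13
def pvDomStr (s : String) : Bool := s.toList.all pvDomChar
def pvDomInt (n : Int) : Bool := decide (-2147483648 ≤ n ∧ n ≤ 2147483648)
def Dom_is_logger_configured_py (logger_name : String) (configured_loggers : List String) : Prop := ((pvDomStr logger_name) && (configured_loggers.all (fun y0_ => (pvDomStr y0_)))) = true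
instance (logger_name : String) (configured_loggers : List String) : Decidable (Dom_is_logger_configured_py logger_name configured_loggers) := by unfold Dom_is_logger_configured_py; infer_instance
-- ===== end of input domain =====

-- B replaces A's generate-every-ancestor-prefix-and-hash strategy by a single scan of the
-- configured names with an equality-or-dotted-prefix test (objective: simpler).

-- ===== PORT A =====
-- literal port of _is_logger_configured; logger_name.split('.') is PySem.Str.split? —
-- the separator is the literal "." ≠ "", so split? is always some and the getD [] default is never taken
def is_logger_configured_py (logger_name : String) (configured_loggers : List String) : Bool :=
  if PySem.Set.contains configured_loggers logger_name then true
  else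
    let parts := (PySem.Str.split? logger_name ".").getD []
    (PySem.List.pyRange ((parts.length : Int) - 1) 0 (-1)).any (fun i =>
      PySem.Set.contains configured_loggers
        (PySem.Str.join "." (PySem.List.slice parts none (some i))))

-- ===== PORT B =====
def is_logger_configured_py_alt (logger_name : String) (configured_loggers : List String) : Bool :=
  configured_loggers.any (fun configured =>
    logger_name == configured || PySem.Str.startswith logger_name (configured ++ "."))

-- ===== PRECONDITION & SPEC =====
def Spec_is_logger_configured_py (logger_name : String) (configured_loggers : List String) (out : Bool) : Prop := out = is_logger_configured_py_alt logger_name configured_loggers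
instance (logger_name : String) (configured_loggers : List String) (out : Bool) : Decidable (Spec_is_logger_configured_py logger_name configured_loggers out) := by unfold Spec_is_logger_configured_py; infer_instance

-- ===== CLAIM (what is proved, stated in full; the proofs are below) =====
def Claim_equal_is_logger_configured_py : Prop := ∀ (logger_name : String) (configured_loggers : List String), Dom_is_logger_configured_py logger_name configured_loggers → Spec_is_logger_configured_py logger_name configured_loggers (is_logger_configured_py logger_name configured_loggers)

-- ===== LEMMAS AND PROOFS =====

-- proof-side model of logger_name.split('.'): split a char list at every '.'
def pvSplitDot : List Char → List (List Char)
  | [] => [[]]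
  | c :: rest => if c = '.' then [] :: pvSplitDot rest else (pvSplitDot rest).modifyHead (List.cons c)

lemma pvSplitDot_ne_nil (cs : List Char) : pvSplitDot cs ≠ [] := by
  cases cs with
  | nil => simp [pvSplitDot]
  | cons c rest =>
    simp only [pvSplitDot]
    split
    · simp
    · intro h
      have := congrArg List.length h
      simp at this
      exact pvSplitDot_ne_nil rest this

lemma modifyHead_fun_id (l : List (List Char)) : l.modifyHead (fun t => t) = l := by
  cases l <;> rfl

lemma splitOn_go_eq : ∀ (fuel : Nat) (l cur : List Char) (acc : List (List Char)),
    l.length ≤ fuel →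
    PySem.Chars.splitOn.go ['.'] fuel l cur acc
      = acc.reverse ++ (pvSplitDot l).modifyHead (fun t => cur.reverse ++ t) := by
  intro fuel
  induction fuel with
  | zero =>
    intro l cur acc hl
    have : l = [] := List.length_eq_zero_iff.mp (Nat.le_zero.mp hl)
    subst this
    show ((cur.reverse ++ []) :: acc).reverse = _
    simp [pvSplitDot]
  | succ n ih =>
    intro l cur acc hl
    cases l with
    | nil =>
      show (cur.reverse :: acc).reverse = _
      simp [pvSplitDot]
    | cons c rest =>
      show (if ['.'].isPrefixOf (c :: rest) then
              PySem.Chars.splitOn.go ['.'] n (List.drop 1 (c :: rest)) [] (cur.reverse :: acc)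
            else PySem.Chars.splitOn.go ['.'] n rest (c :: cur) acc) = _
      have hrest : rest.length ≤ n := by simpa using hl
      by_cases hc : c = '.'
      · subst hc
        rw [if_pos (by simp [List.isPrefixOf])]
        rw [ih _ _ _ (by simpa using hrest)]
        simp [pvSplitDot, modifyHead_fun_id]
      · rw [if_neg (by simp [List.isPrefixOf]; exact Ne.symm hc)]
        rw [ih _ _ _ hrest]
        simp only [pvSplitDot, if_neg hc, List.modifyHead_modifyHead]
        congr 2
        funext t
        simp [Function.comp]

lemma splitOn_eq_pvSplitDot (cs : List Char) :
    PySem.Chars.splitOn cs ['.'] = pvSplitDot cs := by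
  show PySem.Chars.splitOn.go ['.'] (cs.length + 1) cs [] [] = _
  rw [splitOn_go_eq _ _ _ _ (Nat.le_succ _)]
  simp [modifyHead_fun_id]

-- a '.'-join over a take with the head consed is the cons of the join
lemma join_take_cons (a : Char) (p : List Char) (ps : List (List Char)) :
    ∀ i : Nat, 1 ≤ i →
    PySem.Chars.join ['.'] (((a :: p) :: ps).take i) = a :: PySem.Chars.join ['.'] ((p :: ps).take i) := by
  intro i hi
  obtain ⟨k, rfl⟩ : ∃ k, i = k + 1 := ⟨i - 1, by omega⟩
  simp only [List.take_succ_cons]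
  cases hk : ps.take k with
  | nil => simp [PySem.Chars.join_singleton]
  | cons q qs => simp [PySem.Chars.join_cons_cons]

-- KEY: the ancestor prefixes A generates are exactly the strings c with c ++ "." a prefix of cs
lemma key : ∀ (cs c : List Char),
    (c ++ ['.']) <+: cs ↔
    ∃ i : Nat, 1 ≤ i ∧ i < (pvSplitDot cs).length ∧
      PySem.Chars.join ['.'] ((pvSplitDot cs).take i) = c := by
  intro cs
  induction cs with
  | nil =>
    intro c
    constructor
    · rintro ⟨t, ht⟩
      simpa using congrArg List.length ht
    · rintro ⟨i, h1, h2, -⟩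
      simp [pvSplitDot] at h2
      omega
  | cons a rest ih =>
    intro c
    by_cases ha : a = '.'
    · subst ha
      simp only [pvSplitDot, if_true]
      have hPpos : 0 < (pvSplitDot rest).length :=
        List.length_pos_iff.mpr (pvSplitDot_ne_nil rest)
      constructor
      · intro h
        cases c with
        | nil =>
          exact ⟨1, le_refl _, by simpa using hPpos, by simp [PySem.Chars.join_singleton]⟩
        | cons b c' =>
          rw [List.cons_append, List.cons_prefix_cons] at h
          obtain ⟨rfl, h2⟩ := h
          obtain ⟨i, hi1, hi2, hi3⟩ := (ih c').mp h2
          obtain ⟨q, qs, hq⟩ : ∃ q qs, (pvSplitDot rest).take i = q :: qs := by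
            cases h' : (pvSplitDot rest).take i with
            | nil =>
              exfalso
              have hlen := congrArg List.length h'
              rw [List.length_take] at hlen
              simp only [List.length_nil] at hlen
              omega
            | cons q qs => exact ⟨q, qs, rfl⟩
          refine ⟨i + 1, by omega, by simp only [List.length_cons]; omega, ?_⟩
          rw [List.take_succ_cons, hq, PySem.Chars.join_cons_cons]
          rw [hq] at hi3
          simpa using hi3
      · rintro ⟨i, hi1, hi2, hi3⟩
        obtain ⟨k, rfl⟩ : ∃ k, i = k + 1 := ⟨i - 1, by omega⟩
        rw [List.take_succ_cons] at hi3
        by_cases hk : k = 0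
        · subst hk
          simp [PySem.Chars.join_singleton] at hi3
          subst hi3
          exact ⟨rest, by simp⟩
        · obtain ⟨q, qs, hq⟩ : ∃ q qs, (pvSplitDot rest).take k = q :: qs := by
            cases h' : (pvSplitDot rest).take k with
            | nil =>
              exfalso
              have hlen := congrArg List.length h'
              rw [List.length_take] at hlen
              simp only [List.length_nil] at hlen
              omega
            | cons q qs => exact ⟨q, qs, rfl⟩
          rw [hq, PySem.Chars.join_cons_cons] at hi3
          simp only [List.nil_append, List.singleton_append] at hi3
          subst hi3
          rw [List.cons_append, List.cons_prefix_cons]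
          refine ⟨rfl, (ih _).mpr ⟨k, by omega, ?_, ?_⟩⟩
          · simp only [List.length_cons] at hi2; omega
          · rw [hq]
    · simp only [pvSplitDot, ha, if_false]
      obtain ⟨p, ps, hp⟩ : ∃ p ps, pvSplitDot rest = p :: ps := by
        cases h' : pvSplitDot rest with
        | nil => exact absurd h' (pvSplitDot_ne_nil rest)
        | cons p ps => exact ⟨p, ps, rfl⟩
      rw [hp]
      simp only [List.modifyHead_cons]
      constructor
      · intro h
        cases c with
        | nil =>
          simp only [List.nil_append] at h
          rw [List.cons_prefix_cons] at h
          exact absurd h.1.symm ha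
        | cons b c' =>
          rw [List.cons_append, List.cons_prefix_cons] at h
          obtain ⟨rfl, h2⟩ := h
          obtain ⟨i, hi1, hi2, hi3⟩ := (ih c').mp h2
          rw [hp] at hi2 hi3
          refine ⟨i, hi1, by simpa using hi2, ?_⟩
          rw [join_take_cons _ p ps i hi1, hi3]
      · rintro ⟨i, hi1, hi2, hi3⟩
        rw [join_take_cons _ p ps i hi1] at hi3
        subst hi3
        rw [List.cons_append, List.cons_prefix_cons]
        refine ⟨rfl, (ih _).mpr ⟨i, hi1, ?_, ?_⟩⟩
        · rw [hp]; simpa using hi2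
        · rw [hp]

-- membership characterisation of A's countdown range(len-1, 0, -1)
lemma mem_range_down (a i : Int) : i ∈ PySem.List.pyRange a 0 (-1) ↔ 1 ≤ i ∧ i ≤ a := by
  rw [PySem.List.pyRange_neg_one]
  simp only [List.mem_map, List.mem_range]
  constructor
  · rintro ⟨k, hk, rfl⟩
    omega
  · rintro ⟨h1, h2⟩
    exact ⟨(a - i).toNat, by omega, by omega⟩

theorem is_logger_configured_py_spec : Claim_equal_is_logger_configured_py := by
  unfold Claim_equal_is_logger_configured_py
  intro name conf _
  unfold Spec_is_logger_configured_py
  rw [Bool.eq_iff_iff]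
  obtain ⟨parts, hsome, hmap⟩ : ∃ parts, PySem.Str.split? name "." = some parts ∧
      parts.map String.toList = pvSplitDot name.toList := by
    have h := PySem.Str.split?_map name "."
    have h2 : PySem.Chars.split? name.toList ".".toList
        = some (pvSplitDot name.toList) := by
      rw [show ".".toList = ['.'] from rfl]
      simp [PySem.Chars.split?, splitOn_eq_pvSplitDot]
    rw [h2] at h
    obtain ⟨parts, hp1, hp2⟩ := Option.map_eq_some_iff.mp h
    exact ⟨parts, hp1, hp2⟩
  have hlen : parts.length = (pvSplitDot name.toList).length := by
    rw [← hmap, List.length_map]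
  have hjoin : ∀ j : Nat, (PySem.Str.join "." (parts.take j)).toList
      = PySem.Chars.join ['.'] ((pvSplitDot name.toList).take j) := by
    intro j
    rw [PySem.Str.toList_join, show ".".toList = ['.'] from rfl, List.map_take, hmap]
  -- A-side characterisation
  have hA : is_logger_configured_py name conf = true ↔
      (name ∈ conf ∨ ∃ j : Nat, 1 ≤ j ∧ j < parts.length ∧
        PySem.Str.join "." (parts.take j) ∈ conf) := by
    simp only [is_logger_configured_py, hsome, Option.getD_some]
    by_cases hm : name ∈ conf
    · rw [if_pos ((PySem.Set.contains_iff conf name).mpr hm)]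
      simp [hm]
    · rw [if_neg (by rw [PySem.Set.contains_iff]; exact hm)]
      simp only [List.any_eq_true, PySem.Set.contains_iff]
      constructor
      · rintro ⟨i, hi, hci⟩
        rw [mem_range_down] at hi
        refine Or.inr ⟨i.toNat, by omega, by omega, ?_⟩
        rwa [PySem.List.slice_to parts (by omega), ] at hci
      · rintro (h | ⟨j, hj1, hj2, hj3⟩)
        · exact absurd h hm
        · refine ⟨(j : Int), ?_, ?_⟩
          · rw [mem_range_down]; omega
          · rwa [PySem.List.slice_to parts (by omega), Int.toNat_natCast]
  -- B-side characterisation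
  have hB : is_logger_configured_py_alt name conf = true ↔
      (∃ c ∈ conf, name = c ∨ (c.toList ++ ['.']) <+: name.toList) := by
    simp only [is_logger_configured_py_alt, List.any_eq_true, Bool.or_eq_true, beq_iff_eq,
      PySem.Str.startswith_eq, PySem.Chars.startswith_iff, String.toList_append,
      show ".".toList = ['.'] from rfl]
  rw [hA, hB]
  constructor
  · rintro (h | ⟨j, hj1, hj2, hj3⟩)
    · exact ⟨name, h, Or.inl rfl⟩
    · refine ⟨_, hj3, Or.inr ?_⟩
      apply (key name.toList _).mpr
      exact ⟨j, hj1, by omega, (hjoin j).symm⟩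
  · rintro ⟨c, hc, (rfl | hpre)⟩
    · exact Or.inl hc
    · obtain ⟨j, hj1, hj2, hj3⟩ := (key name.toList c.toList).mp hpre
      refine Or.inr ⟨j, hj1, by omega, ?_⟩
      have : PySem.Str.join "." (parts.take j) = c :=
        String.toList_inj.mp (by rw [hjoin j, hj3])
      rwa [this]
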